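-- pv_equiv track=rewrite | github.com/AlyonaKlekovkina/JetBrains-Academy-Regex-Engine | regex.py | compare_backward
-- ===== SOURCE A (Python) =====
-- def compare_backward(regex, i, string, j):
--     r = (len(regex) * -1) - 1
--     if i == r:
--         return True
--     if regex[i] == string[j] or (regex[i] == ".") or (regex[i] == ""):
--         return compare_backward(regex, i - 1, string, j - 1)
--     else:
--         return False
-- ===== SOURCE B (Python) =====
-- def compare_backward(regex, i, string, j):
--     n = i + len(regex) + 1
--     return all(regex[i - k] == string[j - k] or regex[i - k] == "." for k in range(n))
-- ===== Notes on version B (the rewrite author's own statement) =====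
-- stated objective: idiomatic
-- what changed: Replaces A's tail recursion over decreasing negative indices with a single all(...) over range(n) where n = i + len(regex) + 1 is the number of comparison steps computed up front.
import Mathlib
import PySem

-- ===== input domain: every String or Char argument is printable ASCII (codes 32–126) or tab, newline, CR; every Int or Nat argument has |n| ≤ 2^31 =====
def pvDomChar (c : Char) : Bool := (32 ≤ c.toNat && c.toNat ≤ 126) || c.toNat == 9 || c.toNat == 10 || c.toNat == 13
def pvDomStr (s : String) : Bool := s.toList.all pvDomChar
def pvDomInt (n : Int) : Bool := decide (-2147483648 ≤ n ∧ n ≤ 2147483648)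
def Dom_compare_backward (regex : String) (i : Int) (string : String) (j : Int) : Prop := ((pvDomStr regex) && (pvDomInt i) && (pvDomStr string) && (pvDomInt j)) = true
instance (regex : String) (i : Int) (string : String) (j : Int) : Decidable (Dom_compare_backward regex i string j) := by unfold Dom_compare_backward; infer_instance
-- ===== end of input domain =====

-- B rewrites A's tail recursion over negative indices as one all(...) over range(n), n = i + len(regex) + 1 (objective: idiomatic; same cost).

-- ===== PORT A =====
-- Literal port of A's recursion. Where Python raises IndexError (an out-of-range
-- regex[i] or string[j]) the port returns false; those inputs are outside Pre_.
-- The third disjunct `regex[i] == ""` of A is identically false (regex[i] is a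
-- one-character string) and is ported as the char comparisons alone.
def compare_backward (regex : String) (i : Int) (string : String) (j : Int) : Bool :=
  let r : Int := (regex.toList.length : Int) * (-1) - 1
  if i = r then true
  else
    match _h : PySem.List.pyGet? regex.toList i with
    | none => false  -- Python: IndexError (outside Pre_)
    | some rc =>
      match PySem.List.pyGet? string.toList j with
      | none => false  -- Python: IndexError (outside Pre_)
      | some sc =>
        if rc = sc ∨ rc = '.' then compare_backward regex (i - 1) string (j - 1)
        else false
termination_by (i + regex.toList.length + 1).toNat
decreasing_by
  have hnn : ¬ (PySem.List.pyGet? regex.toList i = none) := by simp [_h]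
  rw [PySem.List.pyGet?_eq_none_iff, not_not] at hnn
  unfold PySem.Raise.InRange at hnn
  omega

-- ===== PORT B =====
-- one comparison step of Source B's generator: regex[a] == string[b] or regex[a] == "."
-- (false also where Python would raise IndexError; such steps lie outside Pre_)
def pvStep (cr cs : List Char) (a b : Int) : Bool :=
  match PySem.List.pyGet? cr a, PySem.List.pyGet? cs b with
  | some rc, some sc => rc == sc || rc == '.'
  | _, _ => false

def compare_backward_alt (regex : String) (i : Int) (string : String) (j : Int) : Bool :=
  (List.range (i + (regex.toList.length : Int) + 1).toNat).all
    (fun k => pvStep regex.toList string.toList (i - k) (j - k))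

-- ===== PRECONDITION & SPEC =====
-- Pre_-only helpers (independent of both ports):
-- both indices of step k are in range
def pvValidPre (cr cs : List Char) (i j : Int) (k : Nat) : Bool :=
  (PySem.List.pyGet? cr (i - k)).isSome && (PySem.List.pyGet? cs (j - k)).isSome
-- step k is in range and its characters mismatch (regex char neither equal nor '.')
def pvMismPre (cr cs : List Char) (i j : Int) (k : Nat) : Bool :=
  match PySem.List.pyGet? cr (i - k), PySem.List.pyGet? cs (j - k) with
  | some rc, some sc => !(rc == sc || rc == '.')
  | _, _ => false

-- Exactly the inputs on which Python A returns: i ≥ -len(regex)-1 and either the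
-- walk is empty, or its first step is in range (this bounds the walk) and the backward
-- walk either stays in range for all its n = i+len(regex)+1 steps, or reaches a
-- literal character mismatch (which stops A with False) while still in range.
def Pre_compare_backward (regex : String) (i : Int) (string : String) (j : Int) : Prop :=
  0 ≤ i + (regex.toList.length : Int) + 1 ∧
  (i + (regex.toList.length : Int) + 1 = 0 ∨
   (pvValidPre regex.toList string.toList i j 0 = true ∧
    ((∀ k < (i + (regex.toList.length : Int) + 1).toNat,
        pvValidPre regex.toList string.toList i j k = true) ∨
     (∃ k < (i + (regex.toList.length : Int) + 1).toNat,
        pvMismPre regex.toList string.toList i j k = true ∧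
        ∀ k' ≤ k, pvValidPre regex.toList string.toList i j k' = true))))
instance (regex : String) (i : Int) (string : String) (j : Int) : Decidable (Pre_compare_backward regex i string j) := by unfold Pre_compare_backward; infer_instance

def pvWitness_compare_backward : String × Int × String × Int := ("a.c", -1, "abc", -1)

def Spec_compare_backward (regex : String) (i : Int) (string : String) (j : Int) (out : Bool) : Prop := out = compare_backward_alt regex i string j
instance (regex : String) (i : Int) (string : String) (j : Int) (out : Bool) : Decidable (Spec_compare_backward regex i string j out) := by unfold Spec_compare_backward; infer_instance

-- ===== CLAIM (what is proved, stated in full; the proofs are below) =====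
def Claim_equal_compare_backward : Prop := ∀ (regex : String) (i : Int) (string : String) (j : Int), Dom_compare_backward regex i string j → Pre_compare_backward regex i string j → Spec_compare_backward regex i string j (compare_backward regex i string j)

-- ===== LEMMAS AND PROOFS =====

-- A and B agree on every input with i ≥ -len(regex)-1 (the only part of Pre_ the
-- value equality needs; the rest of Pre_ excludes Python-side exceptions).
lemma pv_main (regex string : String) : ∀ (n : Nat) (i j : Int),
    (i + (regex.toList.length : Int) + 1).toNat = n →
    0 ≤ i + (regex.toList.length : Int) + 1 →
    compare_backward regex i string j = compare_backward_alt regex i string j := by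
  intro n
  induction n with
  | zero =>
    intro i j hn h0
    have hi : i = (regex.toList.length : Int) * (-1) - 1 := by omega
    rw [compare_backward, compare_backward_alt]
    simp [hi]
    omega
  | succ n ih =>
    intro i j hn h0
    have hi : i ≠ (regex.toList.length : Int) * (-1) - 1 := by omega
    have hrange : (List.range (n + 1)) = 0 :: (List.range n).map Nat.succ :=
      List.range_succ_eq_map
    have hB : compare_backward_alt regex i string j =
        (pvStep regex.toList string.toList i j &&
          compare_backward_alt regex (i - 1) string (j - 1)) := by
      rw [compare_backward_alt, compare_backward_alt, hn, hrange]
      have hn' : ((i - 1) + (regex.toList.length : Int) + 1).toNat = n := by omega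
      rw [hn']
      simp only [List.all_cons, List.all_map, Nat.cast_zero, sub_zero]
      congr 1
      congr 1
      funext k
      have e1 : i - (Nat.succ k : Int) = (i - 1) - (k : Int) := by push_cast; ring
      have e2 : j - (Nat.succ k : Int) = (j - 1) - (k : Int) := by push_cast; ring
      simp only [Function.comp, e1, e2]
    rw [compare_backward, hB]
    simp only [hi, if_false]
    rcases hcr : PySem.List.pyGet? regex.toList i with _ | rc
    · simp [pvStep, hcr]
    · rcases hcs : PySem.List.pyGet? string.toList j with _ | sc
      · simp [pvStep, hcr, hcs]
      · by_cases hm : rc = sc ∨ rc = '.'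
        · have hstep : pvStep regex.toList string.toList i j = true := by
            simp [pvStep, hcr, hcs]
            rcases hm with hm | hm
            · exact Or.inl hm
            · exact Or.inr hm
          simp only [hm, if_pos, hstep, Bool.true_and]
          exact ih (i - 1) (j - 1) (by omega) (by omega)
        · have hstep : pvStep regex.toList string.toList i j = false := by
            simp [pvStep, hcr, hcs]
            constructor
            · intro h; exact hm (Or.inl h)
            · intro h; exact hm (Or.inr h)
          simp [hm, hstep]

-- ===== VERDICT (by name: the statement is the Claim_ definition above) =====
theorem compare_backward_spec : Claim_equal_compare_backward := by
  intro regex i string j _ hpre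
  unfold Spec_compare_backward
  exact pv_main regex string _ i j rfl hpre.1
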